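-- pv_equiv track=rewrite | github.com/zykogithub/projets_du_lyc-e | term/periode_3/exo_mer_11jan.py | scores_aimes
-- ===== SOURCE A (Python) =====
-- def scores_aimes(votes):
--     """
--     Renvoie le dictionnaire dont les clés sont les personnes,
--     et les valeurs le nombre de personnes qui leur ont attribué des J'aime.
--     """
--     liste=[]
--     for valeur in votes.values():
--         liste.append(valeur)
--     dico_jaime={}
--     for cle in votes.keys():
--         dico_jaime[cle]=liste.count(cle)
--     return dico_jaime
-- ===== SOURCE B (Python) =====
-- def scores_aimes(votes):
--     """
--     Renvoie le dictionnaire dont les clés sont les personnes,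
--     et les valeurs le nombre de personnes qui leur ont attribué des J'aime.
--     """
--     # Sort the value list once; the number of likes of a key is then the width
--     # of its run in the sorted list, located by two binary searches.
--     vals = sorted(votes.values())
--
--     def bisect_left(a, x):
--         lo, hi = 0, len(a)
--         while lo < hi:
--             mid = (lo + hi) // 2
--             if a[mid] < x:
--                 lo = mid + 1
--             else:
--                 hi = mid
--         return lo
--
--     def bisect_right(a, x):
--         lo, hi = 0, len(a)
--         while lo < hi:
--             mid = (lo + hi) // 2
--             if x < a[mid]:
--                 hi = mid
--             else:
--                 lo = mid + 1
--         return lo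
--
--     return {cle: bisect_right(vals, cle) - bisect_left(vals, cle) for cle in votes}
-- ===== Notes on version B (the rewrite author's own statement) =====
-- stated objective: faster
-- what changed: B sorts the value list once and obtains each key's like-count as the width of its run in the sorted list via two hand-written binary searches, instead of A's linear count() scan of the value list for every key.
import Mathlib
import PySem

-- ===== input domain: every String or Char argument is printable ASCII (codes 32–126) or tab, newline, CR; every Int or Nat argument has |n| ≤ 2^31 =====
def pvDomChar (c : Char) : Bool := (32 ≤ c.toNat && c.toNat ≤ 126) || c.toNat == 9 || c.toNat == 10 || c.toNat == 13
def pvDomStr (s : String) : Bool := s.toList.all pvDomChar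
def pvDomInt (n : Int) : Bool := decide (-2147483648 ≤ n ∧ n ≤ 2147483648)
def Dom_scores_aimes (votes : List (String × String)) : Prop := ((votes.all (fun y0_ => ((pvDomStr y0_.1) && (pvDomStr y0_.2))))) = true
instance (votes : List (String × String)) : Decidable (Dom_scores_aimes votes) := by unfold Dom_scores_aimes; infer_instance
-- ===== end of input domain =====

-- B sorts the value list once and reads each key's count off as the width of its run in the
-- sorted list, found by two hand-written binary searches, instead of A's per-key count() scan.

-- ===== PORT A =====
def scores_aimes (votes : List (String × String)) : List (String × Int) :=
  let liste : List String := (votes.map (·.2)).foldl (fun acc valeur => acc ++ [valeur]) []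
  let dico_jaime : PySem.Dict String Int :=
    (votes.map (·.1)).foldl
      (fun d cle => d.insert cle (PySem.List.count liste cle : Int)) PySem.Dict.empty
  dico_jaime.items

-- ===== PORT B =====
-- Source B's inner `bisect_left` while-loop; `a.getD mid ""` ports `a[mid]` (mid is always in range: lo < hi ≤ len a).
def pvBLeft (a : List String) (x : String) (lo hi : Nat) : Nat :=
  if lo < hi then
    if a.getD ((lo + hi) / 2) "" < x then pvBLeft a x ((lo + hi) / 2 + 1) hi
    else pvBLeft a x lo ((lo + hi) / 2)
  else lo
termination_by hi - lo
decreasing_by all_goals omega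

-- Source B's inner `bisect_right` while-loop.
def pvBRight (a : List String) (x : String) (lo hi : Nat) : Nat :=
  if lo < hi then
    if x < a.getD ((lo + hi) / 2) "" then pvBRight a x lo ((lo + hi) / 2)
    else pvBRight a x ((lo + hi) / 2 + 1) hi
  else lo
termination_by hi - lo
decreasing_by all_goals omega

def scores_aimes_alt (votes : List (String × String)) : List (String × Int) :=
  let vals : List String := PySem.List.sorted (votes.map (·.2)) (fun v => v) false
  let dico : PySem.Dict String Int :=
    (votes.map (·.1)).foldl
      (fun d cle =>
        d.insert cle ((pvBRight vals cle 0 vals.length : Int) - (pvBLeft vals cle 0 vals.length : Int)))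
      PySem.Dict.empty
  dico.items

-- ===== PRECONDITION & SPEC =====
def Spec_scores_aimes (votes : List (String × String)) (out : List (String × Int)) : Prop := out = scores_aimes_alt votes
instance (votes : List (String × String)) (out : List (String × Int)) : Decidable (Spec_scores_aimes votes out) := by unfold Spec_scores_aimes; infer_instance

-- ===== CLAIM (what is proved, stated in full; the proofs are below) =====
def Claim_equal_scores_aimes : Prop := ∀ (votes : List (String × String)), Dom_scores_aimes votes → Spec_scores_aimes votes (scores_aimes votes)

-- ===== LEMMAS AND PROOFS =====

-- countP of a list whose predicate holds exactly on the first m positions is m.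
theorem pv_countP_idx {α : Type} (a : List α) (p : α → Bool) :
    ∀ (m : Nat), m ≤ a.length → (∀ i (hi : i < a.length), p a[i] = decide (i < m)) →
    a.countP p = m := by
  induction a with
  | nil => intro m hm _; simp at hm; simp [hm]
  | cons v t ih =>
      intro m hm h
      have h0 := h 0 (by simp)
      simp only [List.getElem_cons_zero] at h0
      have hshift : ∀ i (hi : i < t.length), p t[i] = decide (i + 1 < m) := by
        intro i hi
        have := h (i + 1) (by simpa using Nat.succ_lt_succ hi)
        simpa using this
      cases m with
      | zero =>
          have hpv : p v = false := by simpa using h0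
          have ht : t.countP p = 0 := ih 0 (by omega)
            (by intro i hi; have := hshift i hi; simpa using this)
          rw [List.countP_cons, ht, hpv]
          simp
      | succ m' =>
          have hpv : p v = true := by simpa using h0
          have ht : t.countP p = m' := ih m' (by simpa using hm)
            (by intro i hi; have := hshift i hi; simpa [Nat.succ_lt_succ_iff] using this)
          rw [List.countP_cons, ht, hpv]
          simp

-- pvBLeft on a sorted list, with the loop invariant, computes the number of elements < x.
theorem pvBLeft_inv (a : List String) (x : String) (hs : a.Pairwise (· ≤ ·)) :
    ∀ (k lo hi : Nat), hi - lo ≤ k → lo ≤ hi → hi ≤ a.length →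
    (∀ i (h : i < a.length), i < lo → a[i] < x) →
    (∀ i (h : i < a.length), hi ≤ i → ¬ a[i] < x) →
    pvBLeft a x lo hi = a.countP (fun v => decide (v < x)) := by
  intro k
  induction k with
  | zero =>
      intro lo hi hk hle hlen hlow hhigh
      have : lo = hi := by omega
      subst this
      rw [pvBLeft, if_neg (by omega)]
      refine (pv_countP_idx a _ lo (by omega) ?_).symm
      intro i hi
      by_cases hc : i < lo
      · simp [hc, hlow i hi hc]
      · simp [hc, hhigh i hi (by omega)]
  | succ k ih =>
      intro lo hi hk hle hlen hlow hhigh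
      by_cases hlt : lo < hi
      · have hmid1 : lo ≤ (lo + hi) / 2 := by omega
        have hmid2 : (lo + hi) / 2 < hi := by omega
        have hmlen : (lo + hi) / 2 < a.length := by omega
        rw [pvBLeft, if_pos hlt, List.getD_eq_getElem a "" hmlen]
        by_cases hc : a[(lo + hi) / 2] < x
        · rw [if_pos hc]
          refine ih ((lo + hi) / 2 + 1) hi (by omega) (by omega) hlen ?_ hhigh
          intro i hi' hilt
          by_cases hil : i < lo
          · exact hlow i hi' hil
          · have hle' : a[i] ≤ a[(lo + hi) / 2] := by
              rcases Nat.lt_or_ge i ((lo + hi) / 2) with h' | h'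
              · exact (List.pairwise_iff_getElem.mp hs) i ((lo + hi) / 2) hi' hmlen h'
              · have : i = (lo + hi) / 2 := by omega
                subst this; exact le_refl _
            exact lt_of_le_of_lt hle' hc
        · rw [if_neg hc]
          refine ih lo ((lo + hi) / 2) (by omega) (by omega) (by omega) hlow ?_
          intro i hi' hile habs
          rcases Nat.lt_or_ge ((lo + hi) / 2) i with h' | h'
          · have hle' : a[(lo + hi) / 2] ≤ a[i] :=
              (List.pairwise_iff_getElem.mp hs) ((lo + hi) / 2) i hmlen hi' h'
            exact hc (lt_of_le_of_lt hle' habs)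
          · have : i = (lo + hi) / 2 := by omega
            subst this; exact hc habs
      · have : lo = hi := by omega
        subst this
        rw [pvBLeft, if_neg (by omega)]
        refine (pv_countP_idx a _ lo (by omega) ?_).symm
        intro i hi
        by_cases hc : i < lo
        · simp [hc, hlow i hi hc]
        · simp [hc, hhigh i hi (by omega)]

-- pvBRight on a sorted list, with the loop invariant, computes the number of elements ≤ x.
theorem pvBRight_inv (a : List String) (x : String) (hs : a.Pairwise (· ≤ ·)) :
    ∀ (k lo hi : Nat), hi - lo ≤ k → lo ≤ hi → hi ≤ a.length →
    (∀ i (h : i < a.length), i < lo → a[i] ≤ x) →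
    (∀ i (h : i < a.length), hi ≤ i → ¬ a[i] ≤ x) →
    pvBRight a x lo hi = a.countP (fun v => decide (v ≤ x)) := by
  intro k
  induction k with
  | zero =>
      intro lo hi hk hle hlen hlow hhigh
      have : lo = hi := by omega
      subst this
      rw [pvBRight, if_neg (by omega)]
      refine (pv_countP_idx a _ lo (by omega) ?_).symm
      intro i hi
      by_cases hc : i < lo
      · simp [hc, hlow i hi hc]
      · simp [hc, hhigh i hi (by omega)]
  | succ k ih =>
      intro lo hi hk hle hlen hlow hhigh
      by_cases hlt : lo < hi
      · have hmid1 : lo ≤ (lo + hi) / 2 := by omega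
        have hmid2 : (lo + hi) / 2 < hi := by omega
        have hmlen : (lo + hi) / 2 < a.length := by omega
        rw [pvBRight, if_pos hlt, List.getD_eq_getElem a "" hmlen]
        by_cases hc : x < a[(lo + hi) / 2]
        · rw [if_pos hc]
          refine ih lo ((lo + hi) / 2) (by omega) (by omega) (by omega) hlow ?_
          intro i hi' hile habs
          rcases Nat.lt_or_ge ((lo + hi) / 2) i with h' | h'
          · have hle' : a[(lo + hi) / 2] ≤ a[i] :=
              (List.pairwise_iff_getElem.mp hs) ((lo + hi) / 2) i hmlen hi' h'
            exact absurd (le_trans hle' habs) (not_le.mpr hc)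
          · have : i = (lo + hi) / 2 := by omega
            subst this; exact absurd habs (not_le.mpr hc)
        · rw [if_neg hc]
          refine ih ((lo + hi) / 2 + 1) hi (by omega) (by omega) hlen ?_ hhigh
          intro i hi' hilt
          by_cases hil : i < lo
          · exact hlow i hi' hil
          · have hle' : a[i] ≤ a[(lo + hi) / 2] := by
              rcases Nat.lt_or_ge i ((lo + hi) / 2) with h' | h'
              · exact (List.pairwise_iff_getElem.mp hs) i ((lo + hi) / 2) hi' hmlen h'
              · have : i = (lo + hi) / 2 := by omega
                subst this; exact le_refl _
            exact le_trans hle' (not_lt.mp hc)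
      · have : lo = hi := by omega
        subst this
        rw [pvBRight, if_neg (by omega)]
        refine (pv_countP_idx a _ lo (by omega) ?_).symm
        intro i hi
        by_cases hc : i < lo
        · simp [hc, hlow i hi hc]
        · simp [hc, hhigh i hi (by omega)]

-- #{v ≤ x} = #{v < x} + #{v = x}, on any list.
theorem pv_countP_le_split (a : List String) (x : String) :
    a.countP (fun v => decide (v ≤ x)) = a.countP (fun v => decide (v < x)) + a.count x := by
  induction a with
  | nil => simp
  | cons v t ih =>
      rw [List.countP_cons, List.countP_cons, List.count_cons, ih]
      rcases lt_trichotomy v x with h | h | h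
      · have h1 : decide (v ≤ x) = true := decide_eq_true (le_of_lt h)
        have h2 : decide (v < x) = true := decide_eq_true h
        have h3 : (v == x) = false := beq_eq_false_iff_ne.mpr (ne_of_lt h)
        rw [h1, h2, h3]; simp; omega
      · subst h
        have h1 : decide (v ≤ v) = true := decide_eq_true le_rfl
        have h2 : decide (v < v) = false := decide_eq_false (lt_irrefl v)
        have h3 : (v == v) = true := beq_self_eq_true v
        rw [h1, h2, h3]; simp; omega
      · have h1 : decide (v ≤ x) = false := decide_eq_false (not_le.mpr h)
        have h2 : decide (v < x) = false := decide_eq_false (not_lt.mpr (le_of_lt h))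
        have h3 : (v == x) = false := beq_eq_false_iff_ne.mpr (ne_of_gt h)
        rw [h1, h2, h3]; simp

-- The two binary searches on the sorted value list recover the count in the original list.
theorem pv_bisect_count (vs : List String) (x : String) :
    (pvBRight (PySem.List.sorted vs (fun v => v) false) x 0 (PySem.List.sorted vs (fun v => v) false).length : Int)
      - (pvBLeft (PySem.List.sorted vs (fun v => v) false) x 0 (PySem.List.sorted vs (fun v => v) false).length : Int)
      = (vs.count x : Int) := by
  set a := PySem.List.sorted vs (fun v => v) false with ha
  have hs : a.Pairwise (· ≤ ·) := by
    simpa using PySem.List.sorted_pairwise vs (fun v => v)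
  have hbl : pvBLeft a x 0 a.length = a.countP (fun v => decide (v < x)) :=
    pvBLeft_inv a x hs a.length 0 a.length (by omega) (by omega) (by omega)
      (by intro i _ h; omega) (by intro i h hle; omega)
  have hbr : pvBRight a x 0 a.length = a.countP (fun v => decide (v ≤ x)) :=
    pvBRight_inv a x hs a.length 0 a.length (by omega) (by omega) (by omega)
      (by intro i _ h; omega) (by intro i h hle; omega)
  have hcnt : a.count x = vs.count x :=
    (PySem.List.sorted_perm vs (fun v => v) false).count_eq x
  rw [hbl, hbr, pv_countP_le_split, hcnt]
  push_cast
  ring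

-- ===== VERDICT (by name: the statement is the Claim_ definition above) =====
theorem scores_aimes_spec : Claim_equal_scores_aimes := by
  intro votes _
  unfold Spec_scores_aimes scores_aimes scores_aimes_alt
  simp only [PySem.List.foldl_append_singleton_eq_map, List.nil_append, List.map_id']
  congr 1
  have hfun :
      (fun (d : PySem.Dict String Int) (cle : String) =>
        d.insert cle (PySem.List.count (votes.map (·.2)) cle : Int))
      = (fun (d : PySem.Dict String Int) (cle : String) =>
        d.insert cle
          ((pvBRight (PySem.List.sorted (votes.map (·.2)) (fun v => v) false) cle 0
              (PySem.List.sorted (votes.map (·.2)) (fun v => v) false).length : Int)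
            - (pvBLeft (PySem.List.sorted (votes.map (·.2)) (fun v => v) false) cle 0
              (PySem.List.sorted (votes.map (·.2)) (fun v => v) false).length : Int))) := by
    funext d cle
    rw [pv_bisect_count (votes.map (·.2)) cle, PySem.List.count_eq]
  rw [hfun]
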